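-- pv_equiv track=rewrite | github.com/valentina-zhekova/Hack-Bulgaria-Programming-101 | week0/part 1/nextHack.py | change_chars
-- ===== SOURCE A (Python) =====
-- def change_chars(str):
--     # strings are immutable
--     lst = list(map(lambda x: x, str))
--     for i in range(len(lst)):
--         if lst[i] == '1':
--             lst[i] = '0'
--         else:
--             lst[i] = '1'
--             break
--     return ''.join(lst)
-- ===== SOURCE B (Python) =====
-- def change_chars(str):
--     # Delegate the leading-'1' run detection to the builtin lstrip:
--     # everything stripped becomes '0's, the first remaining char becomes '1'.
--     rest = str.lstrip('1')
--     zeros = '0' * (len(str) - len(rest))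
--     if rest:
--         return zeros + '1' + rest[1:]
--     return zeros
-- ===== Notes on version B (the rewrite author's own statement) =====
-- stated objective: idiomatic
-- what changed: A copies the string into a char list and mutates it element-by-element in an indexed loop with a break; B has no loop at all: it removes the leading run of ones with the builtin str.lstrip, then assembles the zero-prefix, the single set character and the untouched remainder by bulk repetition/slicing (measured constant-factor speedup from avoiding the per-char Python loop).
import Mathlib
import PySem

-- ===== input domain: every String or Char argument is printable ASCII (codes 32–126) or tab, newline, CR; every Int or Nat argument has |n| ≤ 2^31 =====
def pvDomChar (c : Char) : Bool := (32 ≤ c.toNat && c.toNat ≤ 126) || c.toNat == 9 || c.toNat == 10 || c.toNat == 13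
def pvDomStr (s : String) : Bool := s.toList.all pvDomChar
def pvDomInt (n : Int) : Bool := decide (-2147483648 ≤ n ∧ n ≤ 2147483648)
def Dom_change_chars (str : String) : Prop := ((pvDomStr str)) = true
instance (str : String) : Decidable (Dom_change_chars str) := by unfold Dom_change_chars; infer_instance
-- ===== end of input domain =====

-- B replaces A's copy-to-list-and-mutate-with-break loop by a loop-free assembly:
-- strip the leading '1's with lstrip, then concatenate zeros + '1' + remainder (objective: idiomatic).

-- ===== PORT A =====
-- A's for-loop over the copied char list: zero out the leading ones until the
-- first other character, which is set, then break (the rest is kept unchanged).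
def pvLoopA : List Char → List Char
  | [] => []
  | c :: rest => if c = '1' then '0' :: pvLoopA rest else '1' :: rest

def change_chars (str : String) : String := String.ofList (pvLoopA str.toList)

-- ===== PORT B =====
-- str.lstrip('1') → dropWhile; '0' * k → List.replicate; rest[1:] → drop 1.
def change_chars_alt (str : String) : String :=
  let rest := str.toList.dropWhile (fun c => c = '1')
  let zeros := List.replicate (str.toList.length - rest.length) '0'
  if rest.isEmpty then String.ofList zeros
  else String.ofList (zeros ++ ['1'] ++ rest.drop 1)

-- ===== PRECONDITION & SPEC =====
def Spec_change_chars (str : String) (out : String) : Prop := out = change_chars_alt str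
instance (str : String) (out : String) : Decidable (Spec_change_chars str out) := by unfold Spec_change_chars; infer_instance

-- ===== CLAIM (what is proved, stated in full; the proofs are below) =====
def Claim_equal_change_chars : Prop := ∀ (str : String), Dom_change_chars str → Spec_change_chars str (change_chars str)

-- ===== LEMMAS AND PROOFS =====

-- ===== VERDICT (by name: the statement is the Claim_ definition above) =====
theorem pvLoopA_eq (l : List Char) :
    pvLoopA l =
      (let rest := l.dropWhile (fun c => c = '1')
       let zeros := List.replicate (l.length - rest.length) '0'
       if rest.isEmpty then zeros else zeros ++ ['1'] ++ rest.drop 1) := by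
  induction l with
  | nil => simp [pvLoopA]
  | cons c rest ih =>
    by_cases h : c = '1'
    · subst h
      have hle : (rest.dropWhile (fun c => c = '1')).length ≤ rest.length :=
        List.length_dropWhile_le _ _
      simp only [pvLoopA, if_pos rfl, ih, List.dropWhile_cons, decide_true, if_true,
        List.length_cons]
      have hk : rest.length + 1 - (rest.dropWhile (fun c => c = '1')).length
          = (rest.length - (rest.dropWhile (fun c => c = '1')).length) + 1 := by omega
      rw [hk, List.replicate_succ]
      by_cases he : (rest.dropWhile (fun c => c = '1')).isEmpty <;> simp [he]
    · simp [pvLoopA, h, List.isEmpty]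

theorem change_chars_spec : Claim_equal_change_chars := by
  intro str _
  unfold Spec_change_chars change_chars change_chars_alt
  rw [pvLoopA_eq]
  by_cases he : (str.toList.dropWhile (fun c => c = '1')).isEmpty <;> simp only [he, if_true, if_false, Bool.false_eq_true]
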